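-- pv_equiv track=rewrite | github.com/roman-studer/CEVAE | scripts/dataloader.py | get_one_hot_index
-- ===== SOURCE A (Python) =====
-- def get_one_hot_index(cols):
--     """
--     Generates a list of indexes (start, end) for one hot encoded columns based on prefix of column names
--     :param cols: list of column names
--     :return: list of (start, end) tuples
--     """
--     one_hot_index = []
--     start = 0
--     end = 0
--     current = cols[0].split('_')[0]
--     for i in cols:
--         if i.split('_')[0] == current:
--             end += 1
--         else:
--             one_hot_index.append((start, end))
--             start = end
--             end += 1
--             current = i.split('_')[0]
--
--     return one_hot_index
-- ===== SOURCE B (Python) =====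
-- def get_one_hot_index(cols):
--     prefixes = [c.split('_')[0] for c in cols]
--     current = prefixes[0]
--     boundaries = [0]
--     for i, p in enumerate(prefixes):
--         if p != current:
--             boundaries.append(i)
--             current = p
--     return list(zip(boundaries, boundaries[1:]))
-- ===== Notes on version B (the rewrite author's own statement) =====
-- stated objective: alternative
-- what changed: Replaces A's single accumulator loop carrying (start, end, result) by a boundary-table pass (indices where the prefix changes, built over enumerate) followed by a separate zip of consecutive boundaries; the zip with the shifted table automatically drops the final open group exactly as A does.
-- outside the precondition, e.g. on get_one_hot_index([]): A raises IndexError, B raises IndexError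
import Mathlib
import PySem

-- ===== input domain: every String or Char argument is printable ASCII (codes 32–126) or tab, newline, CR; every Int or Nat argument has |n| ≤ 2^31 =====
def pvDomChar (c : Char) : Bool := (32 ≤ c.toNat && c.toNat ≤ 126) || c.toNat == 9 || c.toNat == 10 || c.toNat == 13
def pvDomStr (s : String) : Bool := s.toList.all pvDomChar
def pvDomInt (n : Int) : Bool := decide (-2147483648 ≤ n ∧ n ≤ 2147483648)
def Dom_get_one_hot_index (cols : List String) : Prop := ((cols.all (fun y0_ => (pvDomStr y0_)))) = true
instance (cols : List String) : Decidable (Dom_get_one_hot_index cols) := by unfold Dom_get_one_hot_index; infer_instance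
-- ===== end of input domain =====

-- B replaces A's four-variable accumulator loop by a boundary-table pass followed by a
-- separate pair-forming zip; same cost, different decomposition (objective: alternative).

-- ===== PORT A =====
-- c.split('_')[0]: split with a nonempty separator always yields a nonempty list,
-- so element [0] is its head (exact).
def pvPrefix (c : String) : String := ((PySem.Str.split? c "_").getD []).headD ""

-- the 'for i in cols' loop with state (one_hot_index, start, end, current)
def pvLoopA : List String → List (Int × Int) → Int → Int → String → List (Int × Int)
  | [], acc, _, _, _ => acc
  | c :: t, acc, s, e, cur =>
    if pvPrefix c = cur then pvLoopA t acc s (e + 1) cur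
    else pvLoopA t (acc ++ [(s, e)]) e (e + 1) (pvPrefix c)

def get_one_hot_index (cols : List String) : List (Int × Int) :=
  match PySem.List.pyGet? cols 0 with   -- cols[0]: IndexError on empty cols (outside Pre_)
  | none => []
  | some c0 => pvLoopA cols [] 0 0 (pvPrefix c0)

-- ===== PORT B =====
-- the enumerate loop building the boundary table
def pvLoopB : List (Int × String) → List Int → String → List Int
  | [], bs, _ => bs
  | (i, p) :: t, bs, cur =>
    if p = cur then pvLoopB t bs cur else pvLoopB t (bs ++ [i]) p

def get_one_hot_index_alt (cols : List String) : List (Int × Int) :=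
  let prefixes := cols.map pvPrefix
  match PySem.List.pyGet? prefixes 0 with   -- prefixes[0]: IndexError on empty cols (outside Pre_)
  | none => []
  | some current =>
    let boundaries := pvLoopB (PySem.List.enumerate prefixes 0) [0] current
    boundaries.zip (PySem.List.slice boundaries (some 1) none)

-- ===== PRECONDITION & SPEC =====
-- Pre_ excludes only the empty list, on which A raises IndexError at cols[0].
def Pre_get_one_hot_index (cols : List String) : Prop := cols ≠ []
instance (cols : List String) : Decidable (Pre_get_one_hot_index cols) := by
  unfold Pre_get_one_hot_index; infer_instance

def pvWitness_get_one_hot_index : List String := ["a_1", "a_2", "b_1"]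

def Spec_get_one_hot_index (cols : List String) (out : List (Int × Int)) : Prop := out = get_one_hot_index_alt cols
instance (cols : List String) (out : List (Int × Int)) : Decidable (Spec_get_one_hot_index cols out) := by unfold Spec_get_one_hot_index; infer_instance

-- ===== CLAIM (what is proved, stated in full; the proofs are below) =====
def Claim_equal_get_one_hot_index : Prop := ∀ (cols : List String), Dom_get_one_hot_index cols → Pre_get_one_hot_index cols → Spec_get_one_hot_index cols (get_one_hot_index cols)

-- ===== LEMMAS AND PROOFS =====

-- appending a boundary extends the pair list by (last boundary, new boundary)
theorem pv_zip_tail_snoc (bs : List Int) (s x : Int) (h : bs.getLast? = some s) :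
    (bs ++ [x]).zip ((bs ++ [x]).tail) = bs.zip bs.tail ++ [(s, x)] := by
  match bs with
  | [] => simp at h
  | [b] => simp_all
  | b :: b2 :: rest =>
    have ih := pv_zip_tail_snoc (b2 :: rest) s x (by simpa using h)
    simpa using ih

-- loop invariant: A's accumulator is the pair list of B's boundary table, whose last entry is A's start
theorem pv_key (t : List String) : ∀ (e s : Int) (cur : String) (bs : List Int),
    bs.getLast? = some s →
    pvLoopA t (bs.zip bs.tail) s e cur
      = (pvLoopB (PySem.List.enumerate (t.map pvPrefix) e) bs cur).zip
        ((pvLoopB (PySem.List.enumerate (t.map pvPrefix) e) bs cur).tail) := by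
  induction t with
  | nil => intro e s cur bs h; simp [pvLoopA, pvLoopB, PySem.List.enumerate_nil]
  | cons c t ih =>
    intro e s cur bs h
    simp only [List.map_cons, PySem.List.enumerate_cons, pvLoopA, pvLoopB]
    by_cases hc : pvPrefix c = cur
    · simp only [hc]
      exact ih (e + 1) s cur bs h
    · simp only [if_neg hc]
      rw [← pv_zip_tail_snoc bs s e h]
      exact ih (e + 1) e (pvPrefix c) (bs ++ [e]) (by simp)

-- ===== VERDICT (by name: the statement is the Claim_ definition above) =====
theorem get_one_hot_index_spec : Claim_equal_get_one_hot_index := by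
  intro cols _ hpre
  unfold Spec_get_one_hot_index
  match cols, hpre with
  | c0 :: rest, _ =>
    show get_one_hot_index (c0 :: rest) = get_one_hot_index_alt (c0 :: rest)
    have hA : PySem.List.pyGet? (c0 :: rest) (0 : Int) = some c0 := by
      simp [PySem.List.pyGet?, PySem.List.pyIdx?]
    have hB : PySem.List.pyGet? ((c0 :: rest).map pvPrefix) (0 : Int) = some (pvPrefix c0) := by
      simp [PySem.List.pyGet?, PySem.List.pyIdx?]
    simp only [get_one_hot_index, get_one_hot_index_alt, hA, hB]
    rw [PySem.List.slice_from_one]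
    have := pv_key (c0 :: rest) 0 0 (pvPrefix c0) [0] (by simp)
    simpa using this
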